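-- pv_equiv track=rewrite | github.com/capellaapparel/retail-dashboard | pages/7_타이틀_키워드_도우미.py | join_with_limit
-- ===== SOURCE A (Python) =====
-- def join_with_limit(parts, limit):
--     out = []
--     cur = 0
--     for p in parts:
--         if not p:
--             continue
--         add = (len(p) + (1 if out else 0))
--         if cur + add <= limit:
--             out.append(p)
--             cur += add
--         else:
--             break
--     return " ".join(out)
-- ===== SOURCE B (Python) =====
-- def join_with_limit(parts, limit):
--     # Decomposed pipeline: filter -> cost table -> prefix sums -> cutoff -> slice.
--     nonempty = [p for p in parts if p]
--     if not nonempty: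
--         return ""
--     costs = [len(nonempty[0])] + [len(p) + 1 for p in nonempty[1:]]
--     prefix = []
--     total = 0
--     for c in costs:
--         total += c
--         prefix.append(total)
--     n = 0
--     while n < len(prefix) and prefix[n] <= limit:
--         n += 1
--     return " ".join(nonempty[:n])
-- ===== Notes on version B (the rewrite author's own statement) =====
-- stated objective: alternative
-- what changed: Replaces A's single fused accumulate-and-break loop over all parts with a staged pipeline: filter the empty parts, materialize a cost list and its prefix sums, count the longest prefix whose cumulative cost stays within the limit, and join a slice of that length.
import Mathlib
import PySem

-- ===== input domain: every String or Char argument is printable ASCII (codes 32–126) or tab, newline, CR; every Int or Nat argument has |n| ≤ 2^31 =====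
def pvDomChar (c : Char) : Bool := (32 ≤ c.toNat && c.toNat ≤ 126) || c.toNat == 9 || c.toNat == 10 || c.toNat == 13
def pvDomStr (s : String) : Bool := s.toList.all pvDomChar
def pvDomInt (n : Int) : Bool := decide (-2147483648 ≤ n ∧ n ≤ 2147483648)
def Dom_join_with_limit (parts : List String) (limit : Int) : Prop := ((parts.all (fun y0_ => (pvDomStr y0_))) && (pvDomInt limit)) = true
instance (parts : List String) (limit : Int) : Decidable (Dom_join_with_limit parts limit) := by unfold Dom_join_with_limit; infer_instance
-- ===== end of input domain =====

-- B replaces A's fused accumulate-and-break loop with a filter → cost list → prefix sums → cutoff → slice pipeline (alternative decomposition, same cost).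


-- ===== PORT A =====
-- A's loop: skip empties, add len(p) (+1 separator if out nonempty) while within limit, break otherwise.
def joinA_go (limit : Int) : List String → List String → Int → List String
  | [], out, _ => out
  | p :: rest, out, cur =>
    if p = "" then joinA_go limit rest out cur
    else
      if cur + (PySem.Str.len p + (if out ≠ [] then 1 else 0)) ≤ limit then
        joinA_go limit rest (out ++ [p]) (cur + (PySem.Str.len p + (if out ≠ [] then 1 else 0)))
      else out

def join_with_limit (parts : List String) (limit : Int) : String :=
  PySem.Str.join " " (joinA_go limit parts [] 0)

-- ===== PORT B =====
-- the 'prefix.append(total)' loop over the cost list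
def joinB_prefix : List Int → Int → List Int
  | [], _ => []
  | c :: cs, total => (total + c) :: joinB_prefix cs (total + c)

-- while n < len(prefix) and prefix[n] <= limit: n += 1
def joinB_cut (limit : Int) : List Int → Nat
  | [] => 0
  | c :: cs => if c ≤ limit then joinB_cut limit cs + 1 else 0

def join_with_limit_alt (parts : List String) (limit : Int) : String :=
  let nonempty := parts.filter (fun p => ¬ (p = ""))
  match nonempty with
  | [] => ""
  | p0 :: rest =>
    let costs : List Int := PySem.Str.len p0 :: rest.map (fun p => PySem.Str.len p + 1)
    let pre := joinB_prefix costs 0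
    let n := joinB_cut limit pre
    PySem.Str.join " " ((p0 :: rest).take n)

-- ===== PRECONDITION & SPEC =====
def Spec_join_with_limit (parts : List String) (limit : Int) (out : String) : Prop := out = join_with_limit_alt parts limit
instance (parts : List String) (limit : Int) (out : String) : Decidable (Spec_join_with_limit parts limit out) := by unfold Spec_join_with_limit; infer_instance

-- ===== CLAIM (what is proved, stated in full; the proofs are below) =====
def Claim_equal_join_with_limit : Prop := ∀ (parts : List String) (limit : Int), Dom_join_with_limit parts limit → Spec_join_with_limit parts limit (join_with_limit parts limit)

-- ===== LEMMAS AND PROOFS =====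

-- common reference: the greedy prefix of a list of NONEMPTY strings whose cumulative cost stays within the limit
def specTail (rem : Int) : List String → List String
  | [] => []
  | p :: ps => if PySem.Str.len p + 1 ≤ rem then p :: specTail (rem - (PySem.Str.len p + 1)) ps else []

def specHead (limit : Int) : List String → List String
  | [] => []
  | p :: ps => if PySem.Str.len p ≤ limit then p :: specTail (limit - PySem.Str.len p) ps else []

def countFit (rem : Int) : List Int → Nat
  | [] => 0
  | c :: cs => if c ≤ rem then countFit (rem - c) cs + 1 else 0

theorem specTail_cons (rem : Int) (p : String) (ps : List String) :
    specTail rem (p :: ps)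
      = if PySem.Str.len p + 1 ≤ rem then p :: specTail (rem - (PySem.Str.len p + 1)) ps else [] := rfl

theorem countFit_cons (rem : Int) (c : Int) (cs : List Int) :
    countFit rem (c :: cs) = if c ≤ rem then countFit (rem - c) cs + 1 else 0 := rfl

theorem joinA_go_cons (limit : Int) (p : String) (rest out : List String) (cur : Int) :
    joinA_go limit (p :: rest) out cur
      = if p = "" then joinA_go limit rest out cur
        else
          if cur + (PySem.Str.len p + (if out ≠ [] then 1 else 0)) ≤ limit then
            joinA_go limit rest (out ++ [p]) (cur + (PySem.Str.len p + (if out ≠ [] then 1 else 0)))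
          else out := rfl

theorem joinA_go_filter (limit : Int) (ps : List String) (out : List String) (cur : Int) :
    joinA_go limit ps out cur = joinA_go limit (ps.filter (fun p => ¬ (p = ""))) out cur := by
  induction ps generalizing out cur with
  | nil => rfl
  | cons p rest ih =>
    by_cases hp : p = "" <;> simp [joinA_go, hp, ih]

theorem joinA_go_tail (limit : Int) (ps : List String) (hps : ∀ p ∈ ps, p ≠ "")
    (out : List String) (hout : out ≠ []) (cur : Int) :
    joinA_go limit ps out cur = out ++ specTail (limit - cur) ps := by
  induction ps generalizing out cur with
  | nil => simp [joinA_go, specTail]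
  | cons p rest ih =>
    have hp : p ≠ "" := hps p (by simp)
    have hrest : ∀ q ∈ rest, q ≠ "" := fun q hq => hps q (by simp [hq])
    rw [joinA_go_cons, if_neg hp, if_pos hout, specTail_cons]
    by_cases h : cur + (PySem.Str.len p + 1) ≤ limit
    · rw [if_pos h, if_pos (by omega : PySem.Str.len p + 1 ≤ limit - cur)]
      rw [ih hrest (out ++ [p]) (by simp) (cur + (PySem.Str.len p + 1))]
      have : limit - (cur + (PySem.Str.len p + 1)) = limit - cur - (PySem.Str.len p + 1) := by omega
      rw [this]
      simp
    · rw [if_neg h, if_neg (by omega : ¬ PySem.Str.len p + 1 ≤ limit - cur)]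
      simp

theorem joinA_go_head (limit : Int) (ps : List String) (hps : ∀ p ∈ ps, p ≠ "") :
    joinA_go limit ps [] 0 = specHead limit ps := by
  cases ps with
  | nil => rfl
  | cons p rest =>
    have hp : p ≠ "" := hps p (by simp)
    have hrest : ∀ q ∈ rest, q ≠ "" := fun q hq => hps q (by simp [hq])
    rw [joinA_go_cons, if_neg hp, if_neg (by simp : ¬ (([] : List String) ≠ []))]
    show (if 0 + (PySem.Str.len p + 0) ≤ limit then _ else _) = specHead limit (p :: rest)
    have e0 : 0 + (PySem.Str.len p + 0) = PySem.Str.len p := by ring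
    rw [e0]
    show _ = if PySem.Str.len p ≤ limit then p :: specTail (limit - PySem.Str.len p) rest else []
    by_cases h : PySem.Str.len p ≤ limit
    · rw [if_pos h, if_pos h]
      rw [List.nil_append, joinA_go_tail limit rest hrest [p] (by simp) (PySem.Str.len p)]
      simp
    · rw [if_neg h, if_neg h]

theorem joinB_cut_prefix (limit : Int) (cs : List Int) (total : Int) :
    joinB_cut limit (joinB_prefix cs total) = countFit (limit - total) cs := by
  induction cs generalizing total with
  | nil => rfl
  | cons c cs ih =>
    show (if total + c ≤ limit then joinB_cut limit (joinB_prefix cs (total + c)) + 1 else 0)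
      = if c ≤ limit - total then countFit (limit - total - c) cs + 1 else 0
    by_cases h : total + c ≤ limit
    · rw [if_pos h, if_pos (by omega : c ≤ limit - total), ih]
      have : limit - (total + c) = limit - total - c := by omega
      rw [this]
    · rw [if_neg h, if_neg (by omega : ¬ c ≤ limit - total)]

theorem take_countFit_tail (rem : Int) (ps : List String) :
    ps.take (countFit rem (ps.map (fun p => PySem.Str.len p + 1))) = specTail rem ps := by
  induction ps generalizing rem with
  | nil => rfl
  | cons p ps ih =>
    rw [List.map_cons, countFit_cons, specTail_cons]
    by_cases h : PySem.Str.len p + 1 ≤ rem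
    · rw [if_pos h, if_pos h, List.take_succ_cons, ih]
    · rw [if_neg h, if_neg h, List.take_zero]

theorem take_countFit_head (limit : Int) (p0 : String) (ps : List String) :
    (p0 :: ps).take (countFit limit (PySem.Str.len p0 :: ps.map (fun p => PySem.Str.len p + 1)))
      = specHead limit (p0 :: ps) := by
  rw [countFit_cons]
  show _ = if PySem.Str.len p0 ≤ limit then p0 :: specTail (limit - PySem.Str.len p0) ps else []
  by_cases h : PySem.Str.len p0 ≤ limit
  · rw [if_pos h, if_pos h, List.take_succ_cons, take_countFit_tail]
  · rw [if_neg h, if_neg h, List.take_zero]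

-- ===== VERDICT (by name: the statement is the Claim_ definition above) =====
theorem join_with_limit_spec : Claim_equal_join_with_limit := by
  intro parts limit _
  unfold Spec_join_with_limit join_with_limit join_with_limit_alt
  rw [joinA_go_filter, joinA_go_head limit _ (by
    intro p hp
    simp only [List.mem_filter, decide_eq_true_eq] at hp
    simpa using hp.2)]
  cases hfe : parts.filter (fun p => ¬ (p = "")) with
  | nil => simp [specHead, PySem.Str.join]
  | cons p0 rest =>
    simp only
    rw [joinB_cut_prefix]
    have : limit - 0 = limit := by omega
    rw [this, take_countFit_head]
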